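-- pv_equiv track=rewrite | github.com/matty900/helsinki_university_python | part5.py | block_correct
-- ===== SOURCE A (Python) =====
-- def block_correct(sudoku: list, row_no: int, column_no: int) -> bool:
--     # Create a list to track already seen numbers
--     seen = []
--
--     # Iterate over the 3x3 block starting at (row_no, column_no)
--     for i in range(row_no, row_no + 3):  # Loop through 3 rows
--         for j in range(column_no, column_no + 3):  # Loop through 3 columns
--             value = sudoku[i][j]
--             if value != 0:  # Ignore zeros
--                 if value in seen:  # Check if value is already in the seen list
--                     return False
--                 seen.append(value)  # Add value to the seen list
--
--     return True  # Return True if no duplicates are found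
-- ===== SOURCE B (Python) =====
-- def block_correct(sudoku: list, row_no: int, column_no: int) -> bool:
--     values = [sudoku[i][j]
--               for i in range(row_no, row_no + 3)
--               for j in range(column_no, column_no + 3)
--               if sudoku[i][j] != 0]
--     return len(values) == len(set(values))
-- ===== Notes on version B (the rewrite author's own statement) =====
-- stated objective: idiomatic
-- what changed: B gathers all nonzero block values with one nested comprehension and decides duplicates by comparing len(values) with len(set(values)), replacing A's incremental seen-list scan with early return.
-- outside the precondition, e.g. on block_correct([[1, 1, 0], [0, 0, 0]], 0, 0): A returns False, B raises IndexError
import Mathlib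
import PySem

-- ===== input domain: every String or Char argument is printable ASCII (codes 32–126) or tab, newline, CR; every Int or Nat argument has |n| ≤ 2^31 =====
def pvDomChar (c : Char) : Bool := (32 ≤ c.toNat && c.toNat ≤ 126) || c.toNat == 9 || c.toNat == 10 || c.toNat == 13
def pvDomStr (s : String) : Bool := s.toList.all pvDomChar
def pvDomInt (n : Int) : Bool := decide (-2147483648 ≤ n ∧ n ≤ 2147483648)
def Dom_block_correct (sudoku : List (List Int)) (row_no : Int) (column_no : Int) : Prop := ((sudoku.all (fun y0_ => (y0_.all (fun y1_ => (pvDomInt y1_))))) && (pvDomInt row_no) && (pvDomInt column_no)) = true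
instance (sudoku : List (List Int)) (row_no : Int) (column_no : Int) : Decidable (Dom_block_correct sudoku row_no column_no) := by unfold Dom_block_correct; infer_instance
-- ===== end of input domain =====

-- B gathers all nonzero block values in one nested comprehension and compares len(values)
-- with len(set(values)), instead of A's incremental seen-list with early return (objective: idiomatic).

-- ===== PORT A =====
-- inner 'for j' loop: threads the seen list; 'none' models the early 'return False'
def pvAInner (row : List Int) (js : List Int) (seen : List Int) : Option (List Int) :=
  match js with
  | [] => some seen
  | j :: rest =>
    let value := (PySem.List.pyGet? row j).getD 0
    if value ≠ 0 then
      if value ∈ seen then none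
      else pvAInner row rest (seen ++ [value])
    else pvAInner row rest seen

-- outer 'for i' loop
def pvAOuter (sudoku : List (List Int)) (is : List Int) (cols : List Int) (seen : List Int) : Bool :=
  match is with
  | [] => true
  | i :: rest =>
    match pvAInner ((PySem.List.pyGet? sudoku i).getD []) cols seen with
    | none => false
    | some seen' => pvAOuter sudoku rest cols seen'

def block_correct (sudoku : List (List Int)) (row_no : Int) (column_no : Int) : Bool :=
  pvAOuter sudoku (PySem.List.pyRange row_no (row_no + 3) 1)
    (PySem.List.pyRange column_no (column_no + 3) 1) []

-- ===== PORT B =====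
def block_correct_alt (sudoku : List (List Int)) (row_no : Int) (column_no : Int) : Bool :=
  let values :=
    (PySem.List.pyRange row_no (row_no + 3) 1).flatMap (fun i =>
      ((PySem.List.pyRange column_no (column_no + 3) 1).map (fun j =>
        (PySem.List.pyGet? ((PySem.List.pyGet? sudoku i).getD []) j).getD 0)).filter
        (fun v => v != 0))
  decide (values.length = (PySem.Set.ofList values).length)

-- ===== PRECONDITION & SPEC =====
-- Pre_ excludes exactly the inputs where some block index is out of range: there Python A
-- raises IndexError, except when a duplicate is seen before reaching the bad index (A then
-- returns False early) — on those inputs B itself raises IndexError, since it visits every cell.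
def Pre_block_correct (sudoku : List (List Int)) (row_no : Int) (column_no : Int) : Prop :=
  ∀ i ∈ PySem.List.pyRange row_no (row_no + 3) 1,
    (PySem.List.pyGet? sudoku i).isSome = true ∧
    ∀ j ∈ PySem.List.pyRange column_no (column_no + 3) 1,
      (PySem.List.pyGet? ((PySem.List.pyGet? sudoku i).getD []) j).isSome = true
instance (sudoku : List (List Int)) (row_no : Int) (column_no : Int) : Decidable (Pre_block_correct sudoku row_no column_no) := by unfold Pre_block_correct; infer_instance

def pvWitness_block_correct : List (List Int) × Int × Int :=
  ([[1, 2, 3], [4, 5, 6], [7, 8, 9]], 0, 0)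

def Spec_block_correct (sudoku : List (List Int)) (row_no : Int) (column_no : Int) (out : Bool) : Prop := out = block_correct_alt sudoku row_no column_no
instance (sudoku : List (List Int)) (row_no : Int) (column_no : Int) (out : Bool) : Decidable (Spec_block_correct sudoku row_no column_no out) := by unfold Spec_block_correct; infer_instance

-- ===== CLAIM (what is proved, stated in full; the proofs are below) =====
def Claim_equal_block_correct : Prop := ∀ (sudoku : List (List Int)) (row_no : Int) (column_no : Int), Dom_block_correct sudoku row_no column_no → Pre_block_correct sudoku row_no column_no → Spec_block_correct sudoku row_no column_no (block_correct sudoku row_no column_no)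

-- ===== LEMMAS AND PROOFS =====

-- flattened form of A's loop over one list of cell values
def pvSeenStep (vs : List Int) (seen : List Int) : Option (List Int) :=
  match vs with
  | [] => some seen
  | v :: rest =>
    if v ≠ 0 then
      if v ∈ seen then none else pvSeenStep rest (seen ++ [v])
    else pvSeenStep rest seen

theorem pvAInner_eq (row : List Int) (js : List Int) (seen : List Int) :
    pvAInner row js seen =
      pvSeenStep (js.map (fun j => (PySem.List.pyGet? row j).getD 0)) seen := by
  induction js generalizing seen with
  | nil => rfl
  | cons j rest ih => simp [pvAInner, pvSeenStep, ih]

theorem pvSeenStep_append (xs ys : List Int) (seen : List Int) :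
    pvSeenStep (xs ++ ys) seen = (pvSeenStep xs seen).bind (pvSeenStep ys) := by
  induction xs generalizing seen with
  | nil => rfl
  | cons x rest ih =>
    simp only [List.cons_append, pvSeenStep]
    split_ifs <;> simp [ih]

theorem pvAOuter_eq (sudoku : List (List Int)) (is cols : List Int) (seen : List Int) :
    pvAOuter sudoku is cols seen =
      (pvSeenStep (is.flatMap (fun i =>
        cols.map (fun j =>
          (PySem.List.pyGet? ((PySem.List.pyGet? sudoku i).getD []) j).getD 0))) seen).isSome := by
  induction is generalizing seen with
  | nil => rfl
  | cons i rest ih =>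
    simp only [pvAOuter, List.flatMap_cons, pvSeenStep_append, pvAInner_eq]
    cases pvSeenStep (cols.map fun j =>
        (PySem.List.pyGet? ((PySem.List.pyGet? sudoku i).getD []) j).getD 0) seen with
    | none => simp
    | some seen' => simpa using ih seen'

theorem pvSeenStep_isSome (vs seen : List Int) :
    (pvSeenStep vs seen).isSome = true ↔
      ((vs.filter (fun v => v != 0)).Nodup ∧
        ∀ v ∈ vs.filter (fun v => v != 0), v ∉ seen) := by
  induction vs generalizing seen with
  | nil => simp [pvSeenStep]
  | cons v rest ih =>
    by_cases hv : v = 0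
    · subst hv; simpa [pvSeenStep] using ih seen
    · by_cases hs : v ∈ seen
      · simp only [pvSeenStep, if_pos hv, if_pos hs]
        have hvf : v ∈ (v :: rest).filter (fun v => v != 0) := by
          simp [hv]
        constructor
        · intro h; simp at h
        · rintro ⟨-, hall⟩; exact absurd hs (hall v hvf)
      · simp only [pvSeenStep, if_pos hv, if_neg hs]
        rw [ih]
        have hf : (v :: rest).filter (fun v => v != 0) = v :: rest.filter (fun v => v != 0) := by
          simp [hv]
        rw [hf]
        constructor
        · rintro ⟨hnd, hall⟩
          refine ⟨List.nodup_cons.2 ⟨fun hm => ?_, hnd⟩, fun u hu => ?_⟩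
          · exact absurd (by simp : v ∈ seen ++ [v]) (hall v hm)
          · rcases List.mem_cons.1 hu with rfl | hu'
            · exact hs
            · exact fun hin => hall u hu' (List.mem_append.2 (Or.inl hin))
        · rintro ⟨hnd0, hall0⟩
          obtain ⟨hvm, hnd⟩ := List.nodup_cons.1 hnd0
          refine ⟨hnd, fun u hu hmem' => ?_⟩
          rcases List.mem_append.1 hmem' with h1 | h1
          · exact hall0 u (List.mem_cons_of_mem _ hu) h1
          · rcases List.mem_singleton.1 h1 with rfl; exact hvm hu

theorem pvOfList_length_eq_iff (xs : List Int) :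
    ((PySem.Set.ofList xs).length = xs.length) ↔ xs.Nodup := by
  induction xs using List.reverseRecOn with
  | nil => simp
  | append_singleton xs x ih =>
    rw [PySem.Set.ofList_append_singleton, PySem.Set.add_eq_ite]
    by_cases hx : x ∈ PySem.Set.ofList xs
    · rw [if_pos hx]
      have hmem : x ∈ xs := (PySem.Set.mem_ofList _ _).1 hx
      have hle := PySem.Set.length_ofList_le (xs := xs)
      have hnod : ¬ (xs ++ [x]).Nodup := by
        intro h
        rcases List.nodup_append.1 h with ⟨-, -, hdis⟩
        exact hdis x hmem x (by simp) rfl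
      simp only [List.length_append, List.length_singleton]
      constructor
      · intro h; omega
      · intro h; exact absurd h hnod
    · rw [if_neg hx]
      have hmem : x ∉ xs := fun h => hx ((PySem.Set.mem_ofList _ _).2 h)
      have hnod : (xs ++ [x]).Nodup ↔ xs.Nodup := by
        constructor
        · exact fun h => (List.nodup_append.1 h).1
        · intro h
          exact List.nodup_append.2 ⟨h, List.nodup_singleton x,
            fun a ha b hb => by rcases List.mem_singleton.1 hb with rfl; rintro rfl; exact hmem ha⟩
      simp only [List.length_append, List.length_singleton, hnod, ← ih]
      omega

theorem pvFilter_flatMap {α β : Type} (l : List α) (f : α → List β) (p : β → Bool) :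
    (l.flatMap f).filter p = l.flatMap (fun a => (f a).filter p) := by
  induction l with
  | nil => rfl
  | cons a rest ih => simp [List.flatMap_cons, List.filter_append, ih]

-- ===== VERDICT (by name: the statement is the Claim_ definition above) =====
theorem block_correct_spec : Claim_equal_block_correct := by
  intro sudoku row_no column_no _ _
  unfold Spec_block_correct block_correct block_correct_alt
  rw [pvAOuter_eq, ← pvFilter_flatMap]
  set vs := (PySem.List.pyRange row_no (row_no + 3) 1).flatMap (fun i =>
      (PySem.List.pyRange column_no (column_no + 3) 1).map (fun j =>
        (PySem.List.pyGet? ((PySem.List.pyGet? sudoku i).getD []) j).getD 0)) with hvs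
  have hA := pvSeenStep_isSome vs []
  simp only [List.not_mem_nil, not_false_eq_true, implies_true, and_true] at hA
  have hB := pvOfList_length_eq_iff (vs.filter (fun v => v != 0))
  rcases h1 : (pvSeenStep vs []).isSome with _ | _
  · have hnn : ¬ (vs.filter (fun v => v != 0)).Nodup := by
      intro h; exact absurd (hA.2 h) (by simp [h1])
    have hne : (vs.filter (fun v => v != 0)).length ≠
        (PySem.Set.ofList (vs.filter (fun v => v != 0))).length := by
      intro h; exact hnn (hB.1 h.symm)
    simp [hne]
  · have hnd := hA.1 h1
    simp [(hB.2 hnd).symm]
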